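-- pv_equiv track=rewrite | github.com/sanghyun-io/tunnelforge | src/ui/dialogs/sql_editor_dialog.py | _apply_limit
-- ===== SOURCE A (Python) =====
-- def _apply_limit(query, limit_value):
--     """SELECT 쿼리에 LIMIT 자동 적용 (이미 LIMIT이 있으면 적용 안함)"""
--     query_upper = query.upper().strip()
--
--     # SELECT 쿼리가 아니면 그대로 반환
--     if not query_upper.startswith('SELECT'):
--         return query
--
--     # 이미 LIMIT이 있으면 그대로 반환
--     # LIMIT 키워드 검색 (문자열 내부 제외)
--     in_string = False
--     string_char = None
--     check_text = []
--
--     for char in query: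
--         if char in ("'", '"') and not in_string:
--             in_string = True
--             string_char = char
--             check_text.append(' ')
--         elif char == string_char and in_string:
--             in_string = False
--             string_char = None
--             check_text.append(' ')
--         elif in_string:
--             check_text.append(' ')
--         else:
--             check_text.append(char)
--
--     clean_query = ''.join(check_text).upper()
--     if ' LIMIT ' in clean_query or clean_query.endswith(' LIMIT'):
--         return query
--
--     # LIMIT 추가
--     return f"{query} LIMIT {limit_value}"
-- ===== SOURCE B (Python) =====
-- def _mask(s):
--     # Replace each quoted literal (quotes included) by spaces, jumping with str.find
--     out = []
--     i, n = 0, len(s)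
--     while i < n:
--         c = s[i]
--         if c in "'\"":
--             j = s.find(c, i + 1)
--             if j == -1:
--                 out.append(' ' * (n - i))
--                 i = n
--             else:
--                 out.append(' ' * (j - i + 1))
--                 i = j + 1
--         else:
--             out.append(c)
--             i = i + 1
--     return ''.join(out)
--
--
-- def _apply_limit(query, limit_value):
--     if not query.upper().strip().startswith('SELECT'):
--         return query
--     clean = _mask(query).upper()
--     if ' LIMIT ' in clean or clean.endswith(' LIMIT'):
--         return query
--     return f"{query} LIMIT {limit_value}"
-- ===== Notes on version B (the rewrite author's own statement) =====
-- stated objective: alternative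
-- what changed: The per-character in_string/string_char state machine is replaced by an index loop that jumps with str.find over each whole quoted literal at once, emitting a run of spaces per literal; no quoting state is maintained.
import Mathlib
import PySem

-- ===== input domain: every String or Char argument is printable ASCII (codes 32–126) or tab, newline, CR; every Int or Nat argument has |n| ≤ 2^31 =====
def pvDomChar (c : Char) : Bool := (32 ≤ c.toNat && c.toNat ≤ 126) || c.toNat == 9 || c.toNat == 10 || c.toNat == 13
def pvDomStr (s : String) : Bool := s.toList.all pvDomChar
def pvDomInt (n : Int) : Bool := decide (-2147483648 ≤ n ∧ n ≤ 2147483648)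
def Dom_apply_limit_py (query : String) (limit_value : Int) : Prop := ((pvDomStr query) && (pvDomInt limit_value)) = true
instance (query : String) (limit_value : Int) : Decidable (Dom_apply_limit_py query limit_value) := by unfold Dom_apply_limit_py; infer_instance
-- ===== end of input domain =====

-- B replaces A's per-character in_string/string_char state machine by a find-and-jump
-- masking of whole quoted literals (objective: alternative, same cost).

-- ===== PORT A =====
-- the 'for char in query' loop: state (in_string, string_char), appending to check_text
def pvLoopA : List Char → Bool → Option Char → List Char
  | [], _, _ => []
  | ch :: cs, inS, sc =>
    if (ch = '\'' ∨ ch = '"') ∧ inS = false then ' ' :: pvLoopA cs true (some ch)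
    else if some ch = sc ∧ inS = true then ' ' :: pvLoopA cs false none
    else if inS = true then ' ' :: pvLoopA cs true sc
    else ch :: pvLoopA cs false sc

def apply_limit_py (query : String) (limit_value : Int) : String :=
  let query_upper := PySem.Chars.strip (PySem.Chars.upper query.toList)
  if PySem.Chars.startswith query_upper "SELECT".toList = false then query
  else
    let clean_query := PySem.Chars.upper (pvLoopA query.toList false none)
    if PySem.Chars.isIn " LIMIT ".toList clean_query = true ∨
       PySem.Chars.endswith clean_query " LIMIT".toList = true then query
    else String.ofList (query.toList ++ " LIMIT ".toList ++ PySem.Int.toChars limit_value)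

-- ===== PORT B =====
-- B's index loop over positions i (while i < n) is the structural recursion on the suffix s[i:]:
-- on a quote, s.find(c, i+1) is Chars.find on the suffix after the quote, and the loop jumps to j+1.
def pvMaskB : List Char → List Char
  | [] => []
  | c :: rest =>
    if c = '\'' ∨ c = '"' then
      let j := PySem.Chars.find rest [c]
      if j = -1 then List.replicate (rest.length + 1) ' '
      else List.replicate (j.toNat + 2) ' ' ++ pvMaskB (rest.drop (j.toNat + 1))
    else c :: pvMaskB rest
termination_by cs => cs.length
decreasing_by
  · simp only [List.length_cons, List.length_drop]; omega
  · simp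

def apply_limit_py_alt (query : String) (limit_value : Int) : String :=
  if PySem.Chars.startswith (PySem.Chars.strip (PySem.Chars.upper query.toList)) "SELECT".toList = false then query
  else
    let clean := PySem.Chars.upper (pvMaskB query.toList)
    if PySem.Chars.isIn " LIMIT ".toList clean = true ∨
       PySem.Chars.endswith clean " LIMIT".toList = true then query
    else String.ofList (query.toList ++ " LIMIT ".toList ++ PySem.Int.toChars limit_value)

-- ===== PRECONDITION & SPEC =====
def Spec_apply_limit_py (query : String) (limit_value : Int) (out : String) : Prop := out = apply_limit_py_alt query limit_value
instance (query : String) (limit_value : Int) (out : String) : Decidable (Spec_apply_limit_py query limit_value out) := by unfold Spec_apply_limit_py; infer_instance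

-- ===== CLAIM (what is proved, stated in full; the proofs are below) =====
def Claim_equal_apply_limit_py : Prop := ∀ (query : String) (limit_value : Int), Dom_apply_limit_py query limit_value → Spec_apply_limit_py query limit_value (apply_limit_py query limit_value)

-- ===== LEMMAS AND PROOFS =====

-- unterminated string: every remaining char becomes a space
lemma pvLoopA_no_close (c : Char) : ∀ rest : List Char, c ∉ rest →
    pvLoopA rest true (some c) = List.replicate rest.length ' ' := by
  intro rest
  induction rest with
  | nil => intro _; rfl
  | cons r rs ih =>
    intro h
    have hr : r ≠ c := by intro e; exact h (e ▸ List.mem_cons_self)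
    have hrs : c ∉ rs := fun m => h (List.mem_cons_of_mem _ m)
    simp [pvLoopA, hr, ih hrs, List.replicate_succ]

-- first closing quote at index m: m+1 spaces, then back to the out-of-string state
lemma pvLoopA_close (c : Char) : ∀ (rest : List Char) (m : Nat),
    (∀ i < m, rest[i]? ≠ some c) → rest[m]? = some c →
    pvLoopA rest true (some c)
      = List.replicate (m + 1) ' ' ++ pvLoopA (rest.drop (m + 1)) false none := by
  intro rest
  induction rest with
  | nil => intro m _ hm; simp at hm
  | cons r rs ih =>
    intro m hlt hm
    cases m with
    | zero =>
      simp at hm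
      subst hm
      simp [pvLoopA, List.replicate_succ]
    | succ m' =>
      have hr : r ≠ c := by
        have := hlt 0 (Nat.succ_pos _)
        simpa using this
      have hlt' : ∀ i < m', rs[i]? ≠ some c := by
        intro i hi
        have := hlt (i + 1) (by omega)
        simpa using this
      have hm' : rs[m']? = some c := by simpa using hm
      simp [pvLoopA, hr, ih m' hlt' hm', List.replicate_succ]

lemma singleton_prefix_drop {c : Char} {l : List Char} {i : Nat} :
    [c] <+: l.drop i ↔ l[i]? = some c := by
  rw [← List.head?_drop]
  cases h : l.drop i with
  | nil => simp
  | cons x xs => simp [List.cons_prefix_cons, eq_comm]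

-- A's in-string scan equals B's masking
lemma pvLoopA_eq_pvMaskB : ∀ (n : Nat) (cs : List Char), cs.length ≤ n →
    pvLoopA cs false none = pvMaskB cs := by
  intro n
  induction n with
  | zero => intro cs h; rw [List.length_eq_zero_iff.mp (Nat.le_zero.mp h)]; simp [pvLoopA, pvMaskB]
  | succ n ih =>
    intro cs h
    cases cs with
    | nil => simp [pvLoopA, pvMaskB]
    | cons c rest =>
      by_cases hq : c = '\'' ∨ c = '"'
      · rw [pvMaskB]
        simp only [hq, if_true]
        have hstep : pvLoopA (c :: rest) false none = ' ' :: pvLoopA rest true (some c) := by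
          simp [pvLoopA, hq]
        by_cases hfind : PySem.Chars.find rest [c] = -1
        · -- no closing quote: c ∉ rest
          have hmem : ¬ [c] <:+: rest := (PySem.Chars.find_eq_neg_one_iff rest [c]).mp hfind
          have hnot : c ∉ rest := by
            intro hm
            exact hmem ((List.singleton_infix_iff c rest).mpr hm)
          rw [hstep, pvLoopA_no_close c rest hnot]
          simp [hfind, List.replicate_succ]
        · -- closing quote at index (find).toNat
          have hnn : 0 ≤ PySem.Chars.find rest [c] := by
            rw [PySem.Chars.find_nonneg_iff]
            by_contra hni
            exact hfind ((PySem.Chars.find_eq_neg_one_iff rest [c]).mpr hni)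
          obtain ⟨hpre, hmin⟩ := PySem.Chars.find_spec hnn
          set m : Nat := (PySem.Chars.find rest [c]).toNat with hm
          have hat : rest[m]? = some c := singleton_prefix_drop.mp hpre
          have hbefore : ∀ i < m, rest[i]? ≠ some c := by
            intro i hi he
            exact hmin i hi (singleton_prefix_drop.mpr he)
          have hlen : (rest.drop (m + 1)).length ≤ n := by
            have h1 : rest.length ≤ n := by simpa using Nat.le_of_succ_le_succ h
            simp only [List.length_drop]; omega
          rw [hstep, pvLoopA_close c rest m hbefore hat, ih _ hlen]
          simp [hfind, List.replicate_succ]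
      · have : pvLoopA (c :: rest) false none = c :: pvLoopA rest false none := by
          simp [pvLoopA, hq]
        rw [this, ih rest (by simpa using Nat.le_of_succ_le_succ h), pvMaskB]
        simp [hq]

-- ===== VERDICT (by name: the statement is the Claim_ definition above) =====
theorem apply_limit_py_spec : Claim_equal_apply_limit_py := by
  intro query limit_value _
  unfold Spec_apply_limit_py apply_limit_py apply_limit_py_alt
  rw [pvLoopA_eq_pvMaskB query.toList.length query.toList le_rfl]
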